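-- pv_equiv track=rewrite | github.com/ramshukla-winwire/PRD | PRDAgent/prd_agent.py | _extract_personas_from_text_enhanced
-- ===== SOURCE A (Python) =====
-- from typing import Dict, Any, Optional, List
--
-- def _extract_personas_from_text_enhanced(text: str) -> List[Dict[str, str]]:
--     """Enhanced persona extraction with better pattern recognition"""
--
--     personas = []
--     lines = text.split('\n')
--
--     # Look for persona indicators
--     persona_keywords = ['persona', 'user type', 'customer segment', 'target user', 'primary user', 'secondary user']
--     role_keywords = ['manager', 'administrator', 'analyst', 'developer', 'executive', 'employee', 'customer', 'client']
--
--     current_persona = {}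
--
--     for line in lines:
--         line = line.strip()
--         if not line:
--             continue
--
--         line_lower = line.lower()
--
--         # Detect new persona
--         if any(keyword in line_lower for keyword in persona_keywords) or any(keyword in line_lower for keyword in role_keywords):
--             if current_persona:
--                 personas.append(current_persona)
--
--             # Extract persona name
--             persona_name = line[:40] if len(line) < 40 else line.split()[0] + " User"
--             current_persona = {
--                 'name': persona_name.replace(':', '').strip(),
--                 'demographics': 'Professional user',
--                 'goals': 'Achieve efficiency and productivity',
--                 'pain_points': 'Current process limitations',
--                 'use_cases': 'Daily operational workflows',
--                 'metrics': 'Time saved and accuracy improved'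
--             }
--
--         # Extract specific attributes
--         elif current_persona:
--             if any(keyword in line_lower for keyword in ['age', 'demographic', 'background', 'experience']):
--                 current_persona['demographics'] = line[:50]
--             elif any(keyword in line_lower for keyword in ['goal', 'objective', 'want', 'need']):
--                 current_persona['goals'] = line[:60]
--             elif any(keyword in line_lower for keyword in ['pain', 'problem', 'challenge', 'frustration']):
--                 current_persona['pain_points'] = line[:60]
--             elif any(keyword in line_lower for keyword in ['use case', 'scenario', 'workflow', 'task']):
--                 current_persona['use_cases'] = line[:60]
--             elif any(keyword in line_lower for keyword in ['success', 'metric', 'measure', 'kpi']):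
--                 current_persona['metrics'] = line[:50]
--
--     if current_persona:
--         personas.append(current_persona)
--
--     return personas
-- ===== SOURCE B (Python) =====
-- from typing import List, Dict
--
-- _PERSONA_KEYWORDS = ['persona', 'user type', 'customer segment', 'target user', 'primary user', 'secondary user']
-- _ROLE_KEYWORDS = ['manager', 'administrator', 'analyst', 'developer', 'executive', 'employee', 'customer', 'client']
--
-- _ATTR_RULES = [
--     ('demographics', ['age', 'demographic', 'background', 'experience'], 50),
--     ('goals', ['goal', 'objective', 'want', 'need'], 60),
--     ('pain_points', ['pain', 'problem', 'challenge', 'frustration'], 60),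
--     ('use_cases', ['use case', 'scenario', 'workflow', 'task'], 60),
--     ('metrics', ['success', 'metric', 'measure', 'kpi'], 50),
-- ]
--
--
-- def _starts_persona(line: str) -> bool:
--     low = line.lower()
--     return any(k in low for k in _PERSONA_KEYWORDS) or any(k in low for k in _ROLE_KEYWORDS)
--
--
-- def _build_persona(header: str, block: List[str]) -> Dict[str, str]:
--     name = header if len(header) < 40 else header.split()[0] + " User"
--     persona = {
--         'name': name.replace(':', '').strip(),
--         'demographics': 'Professional user',
--         'goals': 'Achieve efficiency and productivity',
--         'pain_points': 'Current process limitations',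
--         'use_cases': 'Daily operational workflows',
--         'metrics': 'Time saved and accuracy improved',
--     }
--     for line in block:
--         low = line.lower()
--         for field, keywords, width in _ATTR_RULES:
--             if any(k in low for k in keywords):
--                 persona[field] = line[:width]
--                 break
--     return persona
--
--
-- def _extract_personas_from_text_enhanced(text: str) -> List[Dict[str, str]]:
--     lines = [s for s in (raw.strip() for raw in text.split('\n')) if s]
--     # drop attribute lines before the first persona header
--     while lines and not _starts_persona(lines[0]):
--         lines = lines[1:]
--     personas = []
--     while lines:
--         header, rest = lines[0], lines[1:]
--         block = []
--         while rest and not _starts_persona(rest[0]):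
--             block.append(rest[0])
--             rest = rest[1:]
--         personas.append(_build_persona(header, block))
--         lines = rest
--     return personas
-- ===== Notes on version B (the rewrite author's own statement) =====
-- stated objective: alternative
-- what changed: A threads one stateful loop over all lines with a mutable current-persona dict, boundary appends and a trailing flush; B first filters the stripped lines, then cuts them into per-persona blocks at the header lines (dropping attribute lines before the first header) and builds each persona independently from its own block, with the attribute if/elif chain replaced by a first-match scan over a rule table.
import Mathlib
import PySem

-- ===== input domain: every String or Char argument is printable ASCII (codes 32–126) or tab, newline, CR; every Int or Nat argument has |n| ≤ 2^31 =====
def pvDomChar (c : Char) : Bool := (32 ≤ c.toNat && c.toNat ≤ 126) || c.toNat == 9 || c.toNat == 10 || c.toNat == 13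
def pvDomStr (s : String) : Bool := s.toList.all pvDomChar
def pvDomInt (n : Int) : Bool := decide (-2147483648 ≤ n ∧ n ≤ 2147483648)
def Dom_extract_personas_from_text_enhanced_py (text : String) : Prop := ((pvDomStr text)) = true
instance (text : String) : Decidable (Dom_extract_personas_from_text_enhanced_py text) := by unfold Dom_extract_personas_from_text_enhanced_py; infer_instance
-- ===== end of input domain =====

-- B replaces A's single stateful loop (mutable current dict, append on boundary, trailing flush) by a
-- boundary-slicing decomposition: filter the stripped lines, cut them into per-persona blocks at the
-- header lines, and build each persona from its own block (objective: alternative decomposition).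

-- keyword tables shared by both Pythons (module-level constants in spirit; A writes them inline)
def pvPersonaKeywords : List String := ["persona", "user type", "customer segment", "target user", "primary user", "secondary user"]
def pvRoleKeywords : List String := ["manager", "administrator", "analyst", "developer", "executive", "employee", "customer", "client"]

-- ===== PORT A =====
-- any(keyword in line_lower for keyword in persona_keywords) or any(… role_keywords)
def pvDetectNew (line_lower : String) : Bool :=
  pvPersonaKeywords.any (fun k => PySem.Str.isIn k line_lower) || pvRoleKeywords.any (fun k => PySem.Str.isIn k line_lower)

-- persona_name = line[:40] if len(line) < 40 else line.split()[0] + " User"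
-- (the [0] access: this branch is only reached with line stripped nonempty, so split() ≠ []; .getD "" is never taken)
def pvPersonaNameA (line : String) : String :=
  if PySem.Str.len line < 40 then PySem.Str.slice line none (some 40)
  else (PySem.List.pyGet? (PySem.Str.split₀ line) 0).getD "" ++ " User"

-- the dict literal assigned to current_persona (six distinct literal keys, in source order)
def pvNewPersona (line : String) : PySem.Dict String String :=
  let persona_name := pvPersonaNameA line
  PySem.Dict.mk
    [("name", PySem.Str.strip (PySem.Str.replace persona_name ":" "")),
     ("demographics", "Professional user"),
     ("goals", "Achieve efficiency and productivity"),
     ("pain_points", "Current process limitations"),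
     ("use_cases", "Daily operational workflows"),
     ("metrics", "Time saved and accuracy improved")]

-- the elif chain updating current_persona's attributes
def pvApplyAttrA (cur : PySem.Dict String String) (line : String) : PySem.Dict String String :=
  let line_lower := PySem.Str.lower line
  if ["age", "demographic", "background", "experience"].any (fun k => PySem.Str.isIn k line_lower) then
    cur.insert "demographics" (PySem.Str.slice line none (some 50))
  else if ["goal", "objective", "want", "need"].any (fun k => PySem.Str.isIn k line_lower) then
    cur.insert "goals" (PySem.Str.slice line none (some 60))
  else if ["pain", "problem", "challenge", "frustration"].any (fun k => PySem.Str.isIn k line_lower) then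
    cur.insert "pain_points" (PySem.Str.slice line none (some 60))
  else if ["use case", "scenario", "workflow", "task"].any (fun k => PySem.Str.isIn k line_lower) then
    cur.insert "use_cases" (PySem.Str.slice line none (some 60))
  else if ["success", "metric", "measure", "kpi"].any (fun k => PySem.Str.isIn k line_lower) then
    cur.insert "metrics" (PySem.Str.slice line none (some 50))
  else cur

-- the loop body after "line = line.strip(); if not line: continue"
def pvStepCore (st : List (PySem.Dict String String) × PySem.Dict String String) (line : String) :
    List (PySem.Dict String String) × PySem.Dict String String :=
  let line_lower := PySem.Str.lower line
  if pvDetectNew line_lower then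
    ((if st.2.items ≠ [] then st.1 ++ [st.2] else st.1), pvNewPersona line)
  else if st.2.items ≠ [] then (st.1, pvApplyAttrA st.2 line)
  else st

-- one full iteration of A's for-loop
def pvStepA (st : List (PySem.Dict String String) × PySem.Dict String String) (line0 : String) :
    List (PySem.Dict String String) × PySem.Dict String String :=
  let line := PySem.Str.strip line0
  if line = "" then st else pvStepCore st line

def extract_personas_from_text_enhanced_py (text : String) : List (List (String × String)) :=
  let lines := (PySem.Str.split? text "\n").getD []   -- text.split('\n'); separator ≠ "" so never none
  let st := lines.foldl pvStepA ([], PySem.Dict.empty)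
  (if st.2.items ≠ [] then st.1 ++ [st.2] else st.1).map (fun d => d.items)

-- ===== PORT B =====
def pvAttrRules : List (String × List String × Int) :=
  [("demographics", ["age", "demographic", "background", "experience"], 50),
   ("goals", ["goal", "objective", "want", "need"], 60),
   ("pain_points", ["pain", "problem", "challenge", "frustration"], 60),
   ("use_cases", ["use case", "scenario", "workflow", "task"], 60),
   ("metrics", ["success", "metric", "measure", "kpi"], 50)]

def pvStartsPersona (line : String) : Bool :=
  let low := PySem.Str.lower line
  pvPersonaKeywords.any (fun k => PySem.Str.isIn k low) || pvRoleKeywords.any (fun k => PySem.Str.isIn k low)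

-- B's inner for-loop over _ATTR_RULES with break = first matching rule
def pvApplyAttrB (persona : PySem.Dict String String) (line : String) : PySem.Dict String String :=
  let low := PySem.Str.lower line
  match pvAttrRules.find? (fun r => r.2.1.any (fun k => PySem.Str.isIn k low)) with
  | some r => persona.insert r.1 (PySem.Str.slice line none (some r.2.2))
  | none => persona

-- the dict literal B starts each persona from ([0] access: header is stripped nonempty, .getD "" never taken)
def pvInitPersona (header : String) : PySem.Dict String String :=
  let name := if PySem.Str.len header < 40 then header
              else (PySem.List.pyGet? (PySem.Str.split₀ header) 0).getD "" ++ " User"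
  PySem.Dict.mk
    [("name", PySem.Str.strip (PySem.Str.replace name ":" "")),
     ("demographics", "Professional user"),
     ("goals", "Achieve efficiency and productivity"),
     ("pain_points", "Current process limitations"),
     ("use_cases", "Daily operational workflows"),
     ("metrics", "Time saved and accuracy improved")]

def pvBuildPersona (header : String) (block : List String) : PySem.Dict String String :=
  block.foldl pvApplyAttrB (pvInitPersona header)

-- B's outer while loop: cut the remaining lines at the next persona header
def pvBlocks : List String → List (PySem.Dict String String)
  | [] => []
  | header :: rest =>
    pvBuildPersona header (rest.takeWhile (fun l => !pvStartsPersona l)) ::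
      pvBlocks (rest.dropWhile (fun l => !pvStartsPersona l))
  termination_by ls => ls.length
  decreasing_by simpa using Nat.lt_succ_of_le (List.length_dropWhile_le _ rest)

def extract_personas_from_text_enhanced_py_alt (text : String) : List (List (String × String)) :=
  let lines := (((PySem.Str.split? text "\n").getD []).map PySem.Str.strip).filter (fun s => s ≠ "")
  (pvBlocks (lines.dropWhile (fun l => !pvStartsPersona l))).map (fun d => d.items)

-- ===== PRECONDITION & SPEC =====
def Spec_extract_personas_from_text_enhanced_py (text : String) (out : List (List (String × String))) : Prop := out = extract_personas_from_text_enhanced_py_alt text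
instance (text : String) (out : List (List (String × String))) : Decidable (Spec_extract_personas_from_text_enhanced_py text out) := by unfold Spec_extract_personas_from_text_enhanced_py; infer_instance

-- ===== CLAIM (what is proved, stated in full; the proofs are below) =====
def Claim_equal_extract_personas_from_text_enhanced_py : Prop := ∀ (text : String), Dom_extract_personas_from_text_enhanced_py text → Spec_extract_personas_from_text_enhanced_py text (extract_personas_from_text_enhanced_py text)

-- ===== LEMMAS AND PROOFS =====

theorem pvDetect_eq (line : String) : pvDetectNew (PySem.Str.lower line) = pvStartsPersona line := rfl

theorem pvApplyAttr_eq (cur : PySem.Dict String String) (line : String) :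
    pvApplyAttrA cur line = pvApplyAttrB cur line := by
  unfold pvApplyAttrA pvApplyAttrB pvAttrRules
  simp only [List.find?]
  cases (["age", "demographic", "background", "experience"].any fun k => PySem.Str.isIn k (PySem.Str.lower line)) <;>
  cases (["goal", "objective", "want", "need"].any fun k => PySem.Str.isIn k (PySem.Str.lower line)) <;>
  cases (["pain", "problem", "challenge", "frustration"].any fun k => PySem.Str.isIn k (PySem.Str.lower line)) <;>
  cases (["use case", "scenario", "workflow", "task"].any fun k => PySem.Str.isIn k (PySem.Str.lower line)) <;>
  cases (["success", "metric", "measure", "kpi"].any fun k => PySem.Str.isIn k (PySem.Str.lower line)) <;>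
  rfl

theorem pvApplyAttr_funeq : pvApplyAttrA = pvApplyAttrB :=
  funext fun cur => funext fun line => pvApplyAttr_eq cur line

theorem pvInit_eq (line : String) : pvNewPersona line = pvInitPersona line := by
  unfold pvNewPersona pvInitPersona pvPersonaNameA
  by_cases h : PySem.Str.len line < 40
  · simp only [h, if_true]
    have hs : PySem.Str.slice line none (some 40) = line := by
      simp only [PySem.Str.slice, PySem.Chars.slice_eq_listSlice]
      rw [PySem.List.slice_to _ (by norm_num), List.take_of_length_le
        (by have := PySem.Str.len_eq line; omega)]
      exact String.ofList_toList
    rw [hs]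
  · simp only [h, if_false]

theorem pvBuild_eq (header : String) (block : List String) :
    pvBuildPersona header block = block.foldl pvApplyAttrA (pvNewPersona header) := by
  rw [pvBuildPersona, pvInit_eq, pvApplyAttr_funeq]

theorem pvInsert_items_ne_nil {d : PySem.Dict String String} (h : d.items ≠ []) (k : String) (v : String) :
    (d.insert k v).items ≠ [] := by
  rw [PySem.Dict.items_insert]
  split_ifs <;> simp_all

theorem pvApplyA_ne_nil {d : PySem.Dict String String} (h : d.items ≠ []) (line : String) :
    (pvApplyAttrA d line).items ≠ [] := by
  simp only [pvApplyAttrA]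
  split_ifs <;> first | exact pvInsert_items_ne_nil h _ _ | exact h

theorem pvNewPersona_ne_nil (line : String) : (pvNewPersona line).items ≠ [] := by
  simp [pvNewPersona]

theorem pvFoldA_filter (ls : List String) (st : List (PySem.Dict String String) × PySem.Dict String String) :
    ls.foldl pvStepA st = ((ls.map PySem.Str.strip).filter (fun s => s ≠ "")).foldl pvStepCore st := by
  induction ls generalizing st with
  | nil => rfl
  | cons l ls ih =>
    simp only [List.foldl_cons, List.map_cons, List.filter_cons]
    by_cases h : PySem.Str.strip l = "" <;> simp [pvStepA, h, ih]

theorem pvLoopStarted (ls : List String) (ps : List (PySem.Dict String String))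
    (cur : PySem.Dict String String) (h : cur.items ≠ []) :
    (if (ls.foldl pvStepCore (ps, cur)).2.items ≠ [] then
       (ls.foldl pvStepCore (ps, cur)).1 ++ [(ls.foldl pvStepCore (ps, cur)).2]
     else (ls.foldl pvStepCore (ps, cur)).1) =
    ps ++ (ls.takeWhile (fun l => !pvStartsPersona l)).foldl pvApplyAttrA cur ::
      pvBlocks (ls.dropWhile (fun l => !pvStartsPersona l)) := by
  induction ls generalizing ps cur with
  | nil => simp [pvBlocks, h]
  | cons l ls ih =>
    simp only [List.foldl_cons]
    cases hs : pvStartsPersona l with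
    | true =>
      have hstep : pvStepCore (ps, cur) l = (ps ++ [cur], pvNewPersona l) := by
        simp [pvStepCore, pvDetect_eq, hs, h]
      rw [hstep, ih _ _ (pvNewPersona_ne_nil l)]
      simp [hs, pvBlocks, pvBuild_eq]
    | false =>
      have hstep : pvStepCore (ps, cur) l = (ps, pvApplyAttrA cur l) := by
        simp [pvStepCore, pvDetect_eq, hs, h]
      rw [hstep, ih _ _ (pvApplyA_ne_nil h l)]
      simp [hs]

theorem pvLoopUnstarted (ls : List String) (ps : List (PySem.Dict String String))
    (cur : PySem.Dict String String) (h : cur.items = []) :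
    (if (ls.foldl pvStepCore (ps, cur)).2.items ≠ [] then
       (ls.foldl pvStepCore (ps, cur)).1 ++ [(ls.foldl pvStepCore (ps, cur)).2]
     else (ls.foldl pvStepCore (ps, cur)).1) =
    ps ++ pvBlocks (ls.dropWhile (fun l => !pvStartsPersona l)) := by
  induction ls generalizing ps with
  | nil => simp [pvBlocks, h]
  | cons l ls ih =>
    simp only [List.foldl_cons]
    have hcur : ¬ cur.items ≠ [] := by simp [h]
    cases hs : pvStartsPersona l with
    | true =>
      have hstep : pvStepCore (ps, cur) l = (ps, pvNewPersona l) := by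
        simp [pvStepCore, pvDetect_eq, hs, h]
      rw [hstep, pvLoopStarted _ _ _ (pvNewPersona_ne_nil l)]
      simp [hs, pvBlocks, pvBuild_eq]
    | false =>
      have hstep : pvStepCore (ps, cur) l = (ps, cur) := by
        simp [pvStepCore, pvDetect_eq, hs, h]
      rw [hstep, ih]
      simp [hs]

-- ===== VERDICT (by name: the statement is the Claim_ definition above) =====
theorem extract_personas_from_text_enhanced_py_spec : Claim_equal_extract_personas_from_text_enhanced_py := by
  intro text _
  unfold Spec_extract_personas_from_text_enhanced_py
  simp only [extract_personas_from_text_enhanced_py, extract_personas_from_text_enhanced_py_alt]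
  rw [pvFoldA_filter, pvLoopUnstarted _ _ PySem.Dict.empty rfl]
  simp
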